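-- pv_equiv track=rewrite | github.com/MaxMalmstromGill/library_reader | lab3.py | print_library
-- ===== SOURCE A (Python) =====
-- def print_library(library):
--     result = ""
--     total_time = 0
--     total_songs = 0
--     # Loop through the library to get information about each artist and their songs
--     for artist in library:
--         artist_time = 0
--         for song, time in library[artist].items():
--             artist_time += time
--             total_time += time
--             total_songs += 1
--         # Format the artist information to add to the result string
--         result += artist + " (" + str(len(library[artist])) + " songs, " + str(artist_time // 60) + ":" + str(artist_time % 60) + ")\n"
--         # Loop through the artist's songs to add them to the result string
--         for song, time in library[artist].items():
--             result += "- " + song + "(" + str(time) + ")\n"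
--     # Add the total number of songs and total time to the result string
--     result += "Total: " +  str(total_songs) + " songs, " + str(total_time // 60) + ":" + str(total_time % 60)
--     return result
-- ===== SOURCE B (Python) =====
-- def print_library(library):
--     parts = []
--     total_time = 0
--     total_songs = 0
--     for artist, songs in library.items():
--         artist_time = 0
--         song_lines = []
--         for song, time in songs.items():
--             artist_time += time
--             total_time += time
--             total_songs += 1
--             song_lines.append("- " + song + "(" + str(time) + ")\n")
--         parts.append(artist + " (" + str(len(songs)) + " songs, "
--                      + str(artist_time // 60) + ":" + str(artist_time % 60) + ")\n")
--         parts.append("".join(song_lines))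
--     return ("".join(parts) + "Total: " + str(total_songs) + " songs, "
--             + str(total_time // 60) + ":" + str(total_time % 60))
-- ===== Notes on version B (the rewrite author's own statement) =====
-- stated objective: alternative
-- what changed: B fuses A's two per-artist passes (one summing times, one formatting song lines via repeated key lookup and string +=) into a single pass over .items() that accumulates artist_time and the formatted song lines together, and builds the report by joining a list of parts instead of concatenating onto a growing string.
import Mathlib
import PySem

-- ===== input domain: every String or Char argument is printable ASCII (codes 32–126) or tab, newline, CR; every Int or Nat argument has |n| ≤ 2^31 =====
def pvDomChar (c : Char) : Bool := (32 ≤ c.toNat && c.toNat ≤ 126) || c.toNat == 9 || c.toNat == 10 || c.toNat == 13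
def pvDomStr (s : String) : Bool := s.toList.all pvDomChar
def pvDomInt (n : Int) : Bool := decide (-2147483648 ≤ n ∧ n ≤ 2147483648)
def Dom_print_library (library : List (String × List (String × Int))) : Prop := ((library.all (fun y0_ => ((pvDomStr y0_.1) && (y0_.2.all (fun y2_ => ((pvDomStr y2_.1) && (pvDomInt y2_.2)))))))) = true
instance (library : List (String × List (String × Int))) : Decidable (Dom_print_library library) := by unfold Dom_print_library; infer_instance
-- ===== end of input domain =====

-- B fuses A's two per-artist passes into one pass that accumulates artist_time and the formatted
-- song lines together, and joins a list of parts instead of concatenating onto a growing string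
-- (objective: alternative decomposition, same cost).


-- ===== PORT A =====
-- A iterates the dict's keys and re-looks each artist up ('library[artist]'): the body of A's
-- outer loop, folding the state (result, total_time, total_songs) over one artist entry.
-- The key is always present, so the '.getD []' default is never taken on inputs inside Pre_.
def pvStepA (library : List (String × List (String × Int)))
    (st : String × Int × Int) (p : String × List (String × Int)) : String × Int × Int :=
  let artist := p.1
  let songs := (PySem.Dict.get? ⟨library⟩ artist).getD []   -- library[artist]
  let inner :=
    songs.foldl (fun (w : Int × Int × Int) (q : String × Int) =>
      (w.1 + q.2, w.2.1 + q.2, w.2.2 + 1)) (0, st.2.1, st.2.2)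
  let result := st.1 ++ artist ++ " (" ++ PySem.Int.toStr (songs.length : Int) ++ " songs, "
    ++ PySem.Int.toStr (PySem.Int.floordiv inner.1 60) ++ ":"
    ++ PySem.Int.toStr (PySem.Int.mod inner.1 60) ++ ")\n"
  let result := songs.foldl (fun (r : String) (q : String × Int) =>
    r ++ "- " ++ q.1 ++ "(" ++ PySem.Int.toStr q.2 ++ ")\n") result
  (result, inner.2.1, inner.2.2)

def print_library (library : List (String × List (String × Int))) : String :=
  let st := library.foldl (pvStepA library) ("", 0, 0)
  st.1 ++ "Total: " ++ PySem.Int.toStr st.2.2 ++ " songs, "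
    ++ PySem.Int.toStr (PySem.Int.floordiv st.2.1 60) ++ ":"
    ++ PySem.Int.toStr (PySem.Int.mod st.2.1 60)

-- ===== PORT B =====
-- B's outer-loop body: a SINGLE pass over the artist's songs accumulates artist_time, the two
-- totals and the formatted song lines, then appends the header and the joined lines as parts.
def pvStepB (st : List String × Int × Int) (p : String × List (String × Int)) :
    List String × Int × Int :=
  let w :=
    p.2.foldl (fun (w : Int × Int × Int × List String) (q : String × Int) =>
      (w.1 + q.2, w.2.1 + q.2, w.2.2.1 + 1,
       w.2.2.2 ++ ["- " ++ q.1 ++ "(" ++ PySem.Int.toStr q.2 ++ ")\n"]))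
      (0, st.2.1, st.2.2, [])
  let header := p.1 ++ " (" ++ PySem.Int.toStr (p.2.length : Int) ++ " songs, "
    ++ PySem.Int.toStr (PySem.Int.floordiv w.1 60) ++ ":"
    ++ PySem.Int.toStr (PySem.Int.mod w.1 60) ++ ")\n"
  (st.1 ++ [header, String.join w.2.2.2], w.2.1, w.2.2.1)

def print_library_alt (library : List (String × List (String × Int))) : String :=
  let st := library.foldl pvStepB ([], 0, 0)
  String.join st.1 ++ "Total: " ++ PySem.Int.toStr st.2.2 ++ " songs, "
    ++ PySem.Int.toStr (PySem.Int.floordiv st.2.1 60) ++ ":"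
    ++ PySem.Int.toStr (PySem.Int.mod st.2.1 60)

-- ===== PRECONDITION & SPEC =====
-- Pre_ excludes association lists with duplicate artist keys, or duplicate song keys within one
-- artist: those do not correspond to any Python dict input (dict construction collapses the
-- duplicates), so A's behaviour there is not defined by the source.
def Pre_print_library (library : List (String × List (String × Int))) : Prop :=
  (library.map Prod.fst).Nodup ∧ ∀ p ∈ library, (p.2.map Prod.fst).Nodup
instance (library : List (String × List (String × Int))) : Decidable (Pre_print_library library) := by unfold Pre_print_library; infer_instance
def pvWitness_print_library : (List (String × List (String × Int))) :=
  [("A", [("s", 61), ("t", 5)]), ("B", [("u", 0)])]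
def Spec_print_library (library : List (String × List (String × Int))) (out : String) : Prop := out = print_library_alt library
instance (library : List (String × List (String × Int))) (out : String) : Decidable (Spec_print_library library out) := by unfold Spec_print_library; infer_instance

-- ===== CLAIM (what is proved, stated in full; the proofs are below) =====
def Claim_equal_print_library : Prop := ∀ (library : List (String × List (String × Int))), Dom_print_library library → Pre_print_library library → Spec_print_library library (print_library library)

-- ===== LEMMAS AND PROOFS =====

-- A's step with the dict lookup replaced by the entry's own song list (proof-only helper).
def pvStepA' (st : String × Int × Int) (p : String × List (String × Int)) : String × Int × Int :=
  let songs := p.2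
  let inner :=
    songs.foldl (fun (w : Int × Int × Int) (q : String × Int) =>
      (w.1 + q.2, w.2.1 + q.2, w.2.2 + 1)) (0, st.2.1, st.2.2)
  let result := st.1 ++ p.1 ++ " (" ++ PySem.Int.toStr (songs.length : Int) ++ " songs, "
    ++ PySem.Int.toStr (PySem.Int.floordiv inner.1 60) ++ ":"
    ++ PySem.Int.toStr (PySem.Int.mod inner.1 60) ++ ")\n"
  let result := songs.foldl (fun (r : String) (q : String × Int) =>
    r ++ "- " ++ q.1 ++ "(" ++ PySem.Int.toStr q.2 ++ ")\n") result
  (result, inner.2.1, inner.2.2)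

def pvLine (q : String × Int) : String := "- " ++ q.1 ++ "(" ++ PySem.Int.toStr q.2 ++ ")\n"

theorem nodup_lookup {library : List (String × List (String × Int))}
    (hnd : (library.map Prod.fst).Nodup) {p : String × List (String × Int)} (hp : p ∈ library) :
    PySem.Dict.get? ⟨library⟩ p.1 = some p.2 := by
  induction library with
  | nil => cases hp
  | cons h rest ih =>
    simp only [List.map_cons, List.nodup_cons] at hnd
    rw [PySem.Dict.get?_mk_cons]
    rcases List.mem_cons.mp hp with he | hm
    · subst he; simp
    · have hne : h.1 ≠ p.1 := fun e => hnd.1 (e ▸ List.mem_map_of_mem hm)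
      simp [hne]
      exact ih hnd.2 hm

theorem stepA_eq_stepA' {library : List (String × List (String × Int))}
    (hnd : (library.map Prod.fst).Nodup) (st : String × Int × Int)
    (p : String × List (String × Int)) (hp : p ∈ library) :
    pvStepA library st p = pvStepA' st p := by
  simp only [pvStepA, pvStepA', nodup_lookup hnd hp, Option.getD_some]

theorem join_cons (a : String) (l : List String) :
    String.join (a :: l) = a ++ String.join l := by
  simp [String.join_eq, String.ofList_append]

theorem join_two (parts : List String) (h j : String) :
    String.join (parts ++ [h, j]) = String.join parts ++ h ++ j := by
  simp [String.join_eq, String.ofList_append, String.append_assoc]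

theorem inner_fold_eq (songs : List (String × Int)) (a t s : Int) :
    songs.foldl (fun (w : Int × Int × Int) (q : String × Int) =>
        (w.1 + q.2, w.2.1 + q.2, w.2.2 + 1)) (a, t, s)
      = (a + (songs.map Prod.snd).sum, t + (songs.map Prod.snd).sum, s + songs.length) := by
  induction songs generalizing a t s with
  | nil => simp
  | cons q rest ih =>
    simp only [List.foldl_cons, List.map_cons, List.sum_cons, List.length_cons, ih]
    refine Prod.ext ?_ (Prod.ext ?_ ?_) <;> simp  <;> ring

theorem innerB_fold_eq (songs : List (String × Int)) (a t s : Int) (ls : List String) :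
    songs.foldl (fun (w : Int × Int × Int × List String) (q : String × Int) =>
        (w.1 + q.2, w.2.1 + q.2, w.2.2.1 + 1,
         w.2.2.2 ++ ["- " ++ q.1 ++ "(" ++ PySem.Int.toStr q.2 ++ ")\n"])) (a, t, s, ls)
      = (a + (songs.map Prod.snd).sum, t + (songs.map Prod.snd).sum, s + songs.length,
         ls ++ songs.map pvLine) := by
  induction songs generalizing a t s ls with
  | nil => simp
  | cons q rest ih =>
    simp only [List.foldl_cons, List.map_cons, List.sum_cons, List.length_cons, ih, pvLine]
    refine Prod.ext ?_ (Prod.ext ?_ (Prod.ext ?_ ?_))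
    · simp; ring
    · simp; ring
    · simp; omega
    · simp

theorem line_fold_eq (songs : List (String × Int)) (r0 : String) :
    songs.foldl (fun (r : String) (q : String × Int) =>
        r ++ "- " ++ q.1 ++ "(" ++ PySem.Int.toStr q.2 ++ ")\n") r0
      = r0 ++ String.join (songs.map pvLine) := by
  induction songs generalizing r0 with
  | nil => simp [String.join]
  | cons q rest ih =>
    rw [List.foldl_cons, ih]
    simp [join_cons, pvLine, String.append_assoc]

theorem step_rel (parts : List String) (t s : Int) (p : String × List (String × Int)) :
    pvStepA' (String.join parts, t, s) p
      = ((String.join (pvStepB (parts, t, s) p).1, (pvStepB (parts, t, s) p).2)) := by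
  unfold pvStepA' pvStepB
  simp only [inner_fold_eq, innerB_fold_eq, line_fold_eq, join_two, List.nil_append]
  simp [String.append_assoc]

theorem fold_pair (l : List (String × List (String × Int))) (parts : List String) (t s : Int) :
    l.foldl pvStepA' (String.join parts, t, s)
      = (String.join (l.foldl pvStepB (parts, t, s)).1, (l.foldl pvStepB (parts, t, s)).2) := by
  induction l generalizing parts t s with
  | nil => rfl
  | cons p rest ih =>
    simp only [List.foldl_cons, step_rel]
    exact ih _ _ _

-- ===== VERDICT (by name: the statement is the Claim_ definition above) =====
theorem print_library_spec : Claim_equal_print_library := by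
  intro library _ hpre
  unfold Spec_print_library print_library print_library_alt
  have hc : library.foldl (pvStepA library) ("", 0, 0) = library.foldl pvStepA' ("", 0, 0) :=
    PySem.List.foldl_congr_mem _ _ _ _ (fun acc x hx => stepA_eq_stepA' hpre.1 acc x hx)
  have hj : ("" : String) = String.join [] := rfl
  rw [hc, hj, fold_pair]
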